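-- pv_equiv track=rewrite | github.com/HongDaeYong/codingStudy | DaeYong/3Heap/heapProb2.py | solution
-- ===== SOURCE A (Python) =====
-- def solution(stock, dates, supplies, k):
--     answer = 0
--     dates.append(k)
--     supplies.append(-1)
--     timePast = []
--     timePast.append(dates[0])
--     date = 0
--     max = -1
--     takeIt = False
--     for i in range(1,len(dates)):
--         timePast.append(dates[i]-dates[i-1])
--     for i, (tL, sup) in enumerate(zip(timePast, supplies)):
--         stock -= tL
--         date += timePast[i]
--         if sup != -1 and stock - timePast[i+1] < 0:
--             answer += 1
--             stock += sup
--         elif stock + sup - sum(timePast[i+1:]) >= 0: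
--             return answer
--         else:
--             for j in range(i+2, len(timePast)):
--                 if stock + sup - sum(timePast[i+1:j+1]) >= 0 and j > max:
--                     max = j
--                     takeIt = True
--             if takeIt:
--                 stock += sup
--                 answer += 1
--     return answer
-- ===== SOURCE B (Python) =====
-- def solution(stock, dates, supplies, k):
--     # Same in-place appends to dates/supplies as the original.
--     dates.append(k)
--     supplies.append(-1)
--     n = len(dates)
--     timePast = [dates[0]] + [dates[i] - dates[i - 1] for i in range(1, n)]
--     # prefix sums: pre[t] == sum(timePast[:t]); replaces every slice summation
--     pre = [0]
--     acc = 0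
--     for t in timePast:
--         acc += t
--         pre.append(acc)
--     total = pre[n]
--     answer = 0
--     mx = -1
--     takeIt = False
--     m = min(n, len(supplies))
--     for i in range(m):
--         sup = supplies[i]
--         stock -= timePast[i]
--         if sup != -1 and stock - timePast[i + 1] < 0:
--             answer += 1
--             stock += sup
--         elif stock + sup - (total - pre[i + 1]) >= 0:
--             return answer
--         else:
--             hi = -1
--             for j in range(i + 2, n):
--                 if stock + sup - (pre[j + 1] - pre[i + 1]) >= 0:
--                     hi = j
--             if hi > mx:
--                 mx = hi
--                 takeIt = True
--             if takeIt:
--                 stock += sup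
--                 answer += 1
--     return answer
-- ===== Notes on version B (the rewrite author's own statement) =====
-- stated objective: alternative
-- what changed: B precomputes one prefix-sum list of the inter-delivery gaps so every sum(timePast[a:b]) slice summation becomes a difference of two prefix sums, and replaces A's stateful inner max/takeIt scan by a plain last-qualifying-index scan combined with one comparison.
-- outside the precondition, e.g. on solution(100, [1], [5, 7], 10): A returns 0, B returns 0; on solution(0, [], [3], 5): A raises IndexError, B raises IndexError
import Mathlib
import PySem

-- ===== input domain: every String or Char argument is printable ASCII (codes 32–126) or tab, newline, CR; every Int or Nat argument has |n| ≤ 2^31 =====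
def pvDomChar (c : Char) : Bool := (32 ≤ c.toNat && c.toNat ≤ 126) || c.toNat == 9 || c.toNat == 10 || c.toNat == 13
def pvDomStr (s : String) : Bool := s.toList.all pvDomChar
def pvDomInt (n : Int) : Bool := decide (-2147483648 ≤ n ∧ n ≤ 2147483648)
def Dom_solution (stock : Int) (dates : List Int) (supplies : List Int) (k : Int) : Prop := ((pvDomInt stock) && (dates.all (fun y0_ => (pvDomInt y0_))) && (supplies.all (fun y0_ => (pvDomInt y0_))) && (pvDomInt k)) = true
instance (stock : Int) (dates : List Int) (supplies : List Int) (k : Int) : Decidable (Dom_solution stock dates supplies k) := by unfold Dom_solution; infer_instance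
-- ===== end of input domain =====

-- B replaces A's repeated slice summations by one precomputed prefix-sum list and replaces A's
-- stateful inner max/takeIt-scan by a plain last-qualifying-index scan (objective: alternative).
-- Like A, B appends k to dates and -1 to supplies in place (same side effect).

-- ===== PORT A =====
def solnTimePast (d : List Int) : List Int :=
  (PySem.List.pyRange 1 (d.length : Int) 1).foldl
    (fun tp i => tp ++ [PySem.List.pyGetD d i 0 - PySem.List.pyGetD d (i - 1) 0])
    [PySem.List.pyGetD d 0 0]

-- the loop 'for i, (tL, sup) in enumerate(zip(timePast, supplies))' with its early return;
-- timePast[i+1] is read with a default (only evaluated, as in Python, behind 'sup != -1';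
-- in range whenever Pre_solution holds)
def solnLoop (tp : List Int) (rest : List (Int × Int)) (i : Nat)
    (stock date answer mx : Int) (takeIt : Bool) : Int :=
  match rest with
  | [] => answer
  | (tL, sup) :: rest' =>
    let stock1 := stock - tL
    let date1 := date + PySem.List.pyGetD tp (i : Int) 0
    if sup ≠ -1 ∧ stock1 - PySem.List.pyGetD tp ((i : Int) + 1) 0 < 0 then
      solnLoop tp rest' (i + 1) (stock1 + sup) date1 (answer + 1) mx takeIt
    else if stock1 + sup - (PySem.List.slice tp (some ((i : Int) + 1)) none).sum ≥ 0 then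
      answer
    else
      let st := (PySem.List.pyRange ((i : Int) + 2) (tp.length : Int) 1).foldl
        (fun (st : Int × Bool) j =>
          if stock1 + sup - (PySem.List.slice tp (some ((i : Int) + 1)) (some (j + 1))).sum ≥ 0 ∧ j > st.1
          then (j, true) else st) (mx, takeIt)
      if st.2 then solnLoop tp rest' (i + 1) (stock1 + sup) date1 (answer + 1) st.1 st.2
      else solnLoop tp rest' (i + 1) stock1 date1 answer st.1 st.2

def solution (stock : Int) (dates : List Int) (supplies : List Int) (k : Int) : Int :=
  let dates' := dates ++ [k]
  let supplies' := supplies ++ [-1]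
  let timePast := solnTimePast dates'
  solnLoop timePast (timePast.zip supplies') 0 stock 0 0 (-1) false

-- ===== PORT B =====
def altTimePast (d : List Int) : List Int :=
  [PySem.List.pyGetD d 0 0] ++
    (PySem.List.pyRange 1 (d.length : Int) 1).map
      (fun i => PySem.List.pyGetD d i 0 - PySem.List.pyGetD d (i - 1) 0)

-- pre = [0]; acc = 0; for t in timePast: acc += t; pre.append(acc)
def altPre (tp : List Int) : List Int :=
  (tp.foldl (fun (st : List Int × Int) t => (st.1 ++ [st.2 + t], st.2 + t)) ([0], 0)).1

def altLoop (tp pre sups : List Int) (total : Int) (m i : Nat)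
    (stock answer mx : Int) (takeIt : Bool) : Int :=
  if i < m then
    let sup := PySem.List.pyGetD sups (i : Int) 0
    let stock1 := stock - PySem.List.pyGetD tp (i : Int) 0
    if sup ≠ -1 ∧ stock1 - PySem.List.pyGetD tp ((i : Int) + 1) 0 < 0 then
      altLoop tp pre sups total m (i + 1) (stock1 + sup) (answer + 1) mx takeIt
    else if stock1 + sup - (total - PySem.List.pyGetD pre ((i : Int) + 1) 0) ≥ 0 then
      answer
    else
      let hi := (PySem.List.pyRange ((i : Int) + 2) (tp.length : Int) 1).foldl
        (fun h j =>
          if stock1 + sup - (PySem.List.pyGetD pre (j + 1) 0 - PySem.List.pyGetD pre ((i : Int) + 1) 0) ≥ 0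
          then j else h) (-1)
      if hi > mx then
        altLoop tp pre sups total m (i + 1) (stock1 + sup) (answer + 1) hi true
      else if takeIt then
        altLoop tp pre sups total m (i + 1) (stock1 + sup) (answer + 1) mx takeIt
      else
        altLoop tp pre sups total m (i + 1) stock1 answer mx takeIt
  else answer
termination_by m - i

def solution_alt (stock : Int) (dates : List Int) (supplies : List Int) (k : Int) : Int :=
  let dates' := dates ++ [k]
  let supplies' := supplies ++ [-1]
  let tp := altTimePast dates'
  let pre := altPre tp
  let total := PySem.List.pyGetD pre (tp.length : Int) 0
  altLoop tp pre supplies' total (min tp.length supplies'.length) 0 stock 0 (-1) false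

-- ===== PRECONDITION & SPEC =====
-- Pre_ excludes supplies lists longer than dates whose entry at index len(dates) is not -1: only
-- there can Python A read timePast out of range (IndexError), which an early return may or may not
-- intervene to avoid; where A happens to return early, B returns the same value (see claim.json cites).
def Pre_solution (stock : Int) (dates : List Int) (supplies : List Int) (k : Int) : Prop :=
  supplies.length ≤ dates.length ∨ PySem.List.pyGetD supplies ((dates.length : Nat) : Int) 0 = -1
instance (stock : Int) (dates : List Int) (supplies : List Int) (k : Int) : Decidable (Pre_solution stock dates supplies k) := by unfold Pre_solution; infer_instance

def pvWitness_solution : Int × List Int × List Int × Int := (5, [1, 2, 5], [2, -1, 4], 10)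

def Spec_solution (stock : Int) (dates : List Int) (supplies : List Int) (k : Int) (out : Int) : Prop := out = solution_alt stock dates supplies k
instance (stock : Int) (dates : List Int) (supplies : List Int) (k : Int) (out : Int) : Decidable (Spec_solution stock dates supplies k out) := by unfold Spec_solution; infer_instance

-- ===== CLAIM (what is proved, stated in full; the proofs are below) =====
def Claim_equal_solution : Prop := ∀ (stock : Int) (dates : List Int) (supplies : List Int) (k : Int), Dom_solution stock dates supplies k → Pre_solution stock dates supplies k → Spec_solution stock dates supplies k (solution stock dates supplies k)

-- ===== LEMMAS AND PROOFS =====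

theorem timePast_eq (d : List Int) : altTimePast d = solnTimePast d := by
  unfold solnTimePast altTimePast
  rw [PySem.List.foldl_append_singleton_eq_map]

theorem foldl_pre (tp : List Int) : ∀ (p : List Int) (a : Int),
    tp.foldl (fun (st : List Int × Int) t => (st.1 ++ [st.2 + t], st.2 + t)) (p, a)
      = (p ++ (List.range tp.length).map (fun j => a + (tp.take (j + 1)).sum), a + tp.sum) := by
  induction tp with
  | nil => intro p a; simp
  | cons t tp ih =>
    intro p a
    simp only [List.foldl_cons, ih (p ++ [a + t]) (a + t), List.length_cons,
      List.range_succ_eq_map, List.map_cons, List.map_map]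
    apply Prod.ext
    · simp only [List.append_assoc, List.singleton_append, List.take_succ_cons, List.sum_cons]
      congr 1
      congr 1
      · simp
      · apply List.map_congr_left; intro j _
        simp only [Function.comp_apply, List.take_succ_cons, List.sum_cons]
        ring
    · simp; ring

theorem altPre_eq (tp : List Int) :
    altPre tp = (List.range (tp.length + 1)).map (fun j => (tp.take j).sum) := by
  unfold altPre
  rw [foldl_pre]
  simp [List.range_succ_eq_map, List.map_map, Function.comp]

theorem pre_get (tp : List Int) (j : Nat) (hj : j ≤ tp.length) :
    PySem.List.pyGetD (altPre tp) (j : Int) 0 = (tp.take j).sum := by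
  rw [altPre_eq, PySem.List.pyGetD_natCast]
  rw [List.getD_eq_getElem?_getD, List.getElem?_map, List.getElem?_range (by omega)]
  simp

theorem pre_get' (tp : List Int) (j : Int) (h0 : 0 ≤ j) (hj : j ≤ (tp.length : Int)) :
    PySem.List.pyGetD (altPre tp) j 0 = (tp.take j.toNat).sum := by
  have h : j = ((j.toNat : Nat) : Int) := by omega
  rw [h, pre_get tp j.toNat (by omega), Int.toNat_natCast]

theorem sum_take_sub (l : List Int) (a b : Nat) (hab : a ≤ b) :
    ((l.drop a).take (b - a)).sum = (l.take b).sum - (l.take a).sum := by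
  have h : l.take b = l.take a ++ (l.drop a).take (b - a) := by
    rw [← List.take_add]; congr 1; omega
  rw [h, List.sum_append]; ring

theorem sum_drop (l : List Int) (a : Nat) :
    (l.drop a).sum = l.sum - (l.take a).sum := by
  have h2 : (l.take a).sum + (l.drop a).sum = l.sum := by
    rw [← List.sum_append, List.take_append_drop]
  omega

theorem fold_last_mem (c : Int → Prop) [DecidablePred c] (L : List Int) : ∀ (h0 : Int),
    L.foldl (fun h j => if c j then j else h) h0 = h0
      ∨ L.foldl (fun h j => if c j then j else h) h0 ∈ L := by
  induction L with
  | nil => intro h0; left; rfl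
  | cons x L ih =>
    intro h0
    simp only [List.foldl_cons]
    rcases ih (if c x then x else h0) with h | h
    · rw [h]
      split
      · right; simp
      · left; rfl
    · right; simp [h]

theorem fold_max (c : Int → Prop) [DecidablePred c] (L : List Int) (mx : Int) (t : Bool)
    (hp : L.Pairwise (· < ·)) (hmx : -1 ≤ mx) :
    L.foldl (fun (st : Int × Bool) j => if c j ∧ j > st.1 then (j, true) else st) (mx, t)
      = (if L.foldl (fun h j => if c j then j else h) (-1) > mx
         then (L.foldl (fun h j => if c j then j else h) (-1), true) else (mx, t)) := by
  induction L using List.reverseRecOn with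
  | nil => simp; omega
  | append_singleton L x ih =>
    have hp' : L.Pairwise (· < ·) := (List.pairwise_append.mp hp).1
    have hlt : ∀ y ∈ L, y < x := by
      intro y hy
      exact (List.pairwise_append.mp hp).2.2 y hy x (by simp)
    rw [List.foldl_append, List.foldl_append, ih hp']
    simp only [List.foldl_cons, List.foldl_nil]
    by_cases hc : c x
    · have hx' : (if c x then x else L.foldl (fun h j => if c j then j else h) (-1))
          = x := if_pos hc
      rw [hx']
      rcases fold_last_mem c L (-1) with hg | hg
      · rw [hg]
        have hneg : ¬((-1:Int) > mx) := by omega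
        rw [if_neg hneg]
        simp [hc]
      · have hgx := hlt _ hg
        by_cases hgm : L.foldl (fun h j => if c j then j else h) (-1) > mx
        · rw [if_pos hgm]
          simp only [hc, true_and]
          rw [if_pos (by omega : x > (L.foldl (fun h j => if c j then j else h) (-1), true).1)]
          first
          | rfl
          | rw [if_pos (by omega : x > mx)]
        · rw [if_neg hgm]
          simp only [hc, true_and]
    · have hx' : (if c x then x else L.foldl (fun h j => if c j then j else h) (-1))
          = L.foldl (fun h j => if c j then j else h) (-1) := if_neg hc
      rw [hx', if_neg (by simp [hc])]

theorem loop_eq (tp sups : List Int) (rest : List (Int × Int)) : ∀ (i : Nat)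
    (stock date answer mx : Int) (takeIt : Bool),
    rest = (tp.zip sups).drop i → -1 ≤ mx →
    solnLoop tp rest i stock date answer mx takeIt
      = altLoop tp (altPre tp) sups (PySem.List.pyGetD (altPre tp) (tp.length : Int) 0)
          (min tp.length sups.length) i stock answer mx takeIt := by
  induction rest with
  | nil =>
    intro i stock date answer mx takeIt hrest hmx
    have hm : (tp.zip sups).length ≤ i := by
      by_contra h
      rw [List.drop_eq_getElem_cons (by omega)] at hrest
      simp at hrest
    rw [List.length_zip] at hm
    rw [solnLoop, altLoop, if_neg (by omega)]
  | cons hd rest' ih =>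
    intro i stock date answer mx takeIt hrest hmx
    obtain ⟨tL, sup⟩ := hd
    have hlen : i < (tp.zip sups).length := by
      by_contra h
      rw [List.drop_eq_nil_of_le (by omega)] at hrest
      simp at hrest
    have him : i < min tp.length sups.length := by
      rw [List.length_zip] at hlen; omega
    have hitp : i < tp.length := by omega
    have hisup : i < sups.length := by omega
    rw [List.drop_eq_getElem_cons hlen, List.getElem_zip] at hrest
    injection hrest with h1 hrest'
    injection h1 with htL hsup
    subst htL hsup hrest'
    have hsupr : PySem.List.pyGetD sups (i : Int) 0 = sups[i] := by
      simp [PySem.List.pyGetD_natCast, List.getD_eq_getElem?_getD, List.getElem?_eq_getElem hisup]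
    have htpr : PySem.List.pyGetD tp (i : Int) 0 = tp[i] := by
      simp [PySem.List.pyGetD_natCast, List.getD_eq_getElem?_getD, List.getElem?_eq_getElem hitp]
    simp only [solnLoop]
    rw [altLoop, if_pos him, hsupr, htpr]
    by_cases hb1 : sups[i] ≠ -1 ∧ stock - tp[i] - PySem.List.pyGetD tp ((i : Int) + 1) 0 < 0
    · rw [if_pos hb1, if_pos hb1]
      exact ih (i + 1) _ _ _ _ _ rfl hmx
    · rw [if_neg hb1, if_neg hb1]
      have htotal : PySem.List.pyGetD (altPre tp) (tp.length : Int) 0 = tp.sum := by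
        rw [pre_get tp tp.length le_rfl, List.take_length]
      have hprei : PySem.List.pyGetD (altPre tp) ((i : Int) + 1) 0 = (tp.take (i + 1)).sum := by
        have hcast : ((i : Int) + 1) = ((i + 1 : Nat) : Int) := by push_cast; ring
        rw [hcast, pre_get tp (i + 1) (by omega)]
      have hslice : (PySem.List.slice tp (some ((i : Int) + 1)) none).sum
          = PySem.List.pyGetD (altPre tp) (tp.length : Int) 0
            - PySem.List.pyGetD (altPre tp) ((i : Int) + 1) 0 := by
        rw [PySem.List.slice_from tp (by omega), htotal, hprei]
        have h2 : ((i : Int) + 1).toNat = i + 1 := by omega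
        rw [h2, sum_drop]
      rw [hslice]
      by_cases hb2 : stock - tp[i] + sups[i]
          - (PySem.List.pyGetD (altPre tp) (tp.length : Int) 0
             - PySem.List.pyGetD (altPre tp) ((i : Int) + 1) 0) ≥ 0
      · rw [if_pos hb2, if_pos hb2]
      · rw [if_neg hb2, if_neg hb2]
        have hcong : (PySem.List.pyRange ((i : Int) + 2) (tp.length : Int) 1).foldl
            (fun (st : Int × Bool) j =>
              if stock - tp[i] + sups[i] - (PySem.List.slice tp (some ((i : Int) + 1)) (some (j + 1))).sum ≥ 0 ∧ j > st.1
              then (j, true) else st) (mx, takeIt)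
          = (PySem.List.pyRange ((i : Int) + 2) (tp.length : Int) 1).foldl
            (fun (st : Int × Bool) j =>
              if stock - tp[i] + sups[i] - (PySem.List.pyGetD (altPre tp) (j + 1) 0 - PySem.List.pyGetD (altPre tp) ((i : Int) + 1) 0) ≥ 0 ∧ j > st.1
              then (j, true) else st) (mx, takeIt) := by
          apply PySem.List.foldl_congr_mem
          intro st j hj
          rw [PySem.List.mem_pyRange_one] at hj
          have hsl : (PySem.List.slice tp (some ((i : Int) + 1)) (some (j + 1))).sum
              = PySem.List.pyGetD (altPre tp) (j + 1) 0 - PySem.List.pyGetD (altPre tp) ((i : Int) + 1) 0 := by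
            rw [PySem.List.slice_toNat tp (by omega) (by omega)]
            have h2 : ((i : Int) + 1).toNat = i + 1 := by omega
            rw [h2, sum_take_sub tp (i + 1) ((j + 1).toNat) (by omega)]
            rw [pre_get' tp (j + 1) (by omega) (by omega), hprei]
          rw [hsl]
        rw [hcong]
        rw [fold_max (fun j => stock - tp[i] + sups[i]
              - (PySem.List.pyGetD (altPre tp) (j + 1) 0 - PySem.List.pyGetD (altPre tp) ((i : Int) + 1) 0) ≥ 0)
            (PySem.List.pyRange ((i : Int) + 2) (tp.length : Int) 1) mx takeIt
            (PySem.List.pairwise_lt_pyRange_one _ _) hmx]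
        obtain ⟨g, hg⟩ : ∃ g, List.foldl
            (fun h j => if stock - tp[i] + sups[i]
                - (PySem.List.pyGetD (altPre tp) (j + 1) 0 - PySem.List.pyGetD (altPre tp) ((i : Int) + 1) 0) ≥ 0
              then j else h) (-1) (PySem.List.pyRange ((i : Int) + 2) (tp.length : Int) 1) = g := ⟨_, rfl⟩
        rw [hg]
        dsimp only
        by_cases hgm : g > mx
        · simp only [if_pos hgm]
          rw [if_pos trivial]
          exact ih (i + 1) _ _ _ _ _ rfl (by omega)
        · simp only [if_neg hgm]
          by_cases ht : takeIt = true
          · simp only [if_pos ht]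
            exact ih (i + 1) _ _ _ _ _ rfl hmx
          · simp only [if_neg ht]
            exact ih (i + 1) _ _ _ _ _ rfl hmx

-- ===== VERDICT (by name: the statement is the Claim_ definition above) =====
theorem solution_spec : Claim_equal_solution := by
  intro stock dates supplies k _ _
  unfold Spec_solution
  have hA : solution stock dates supplies k
      = solnLoop (solnTimePast (dates ++ [k]))
          ((solnTimePast (dates ++ [k])).zip (supplies ++ [-1])) 0 stock 0 0 (-1) false := rfl
  have hB : solution_alt stock dates supplies k
      = altLoop (altTimePast (dates ++ [k])) (altPre (altTimePast (dates ++ [k])))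
          (supplies ++ [-1])
          (PySem.List.pyGetD (altPre (altTimePast (dates ++ [k]))) (((altTimePast (dates ++ [k])).length : Nat) : Int) 0)
          (min (altTimePast (dates ++ [k])).length (supplies ++ [-1]).length) 0 stock 0 (-1) false := rfl
  rw [hA, hB, timePast_eq]
  exact loop_eq _ _ _ 0 stock 0 0 (-1) false rfl (by omega)
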